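-- pv_equiv track=rewrite | github.com/CSStudySession/AlgoInPython | Meta/Meta generate number from intervals.py | generate_n_digit_nums_loop
-- ===== SOURCE A (Python) =====
-- def generate_n_digit_nums_loop(intervals: list[list[int]]) -> list[int]:
--     if not intervals:
--         return []
--     # 从只包含0的单个数字开始
--     current_numbers = [0]
--
--     for pos, interval in enumerate(intervals):
--         next_numbers = []
--         for current_num in current_numbers:
--             for digit in interval:
--                 # 第一位不能为0
--                 if pos == 0 and digit == 0:
--                     continue
--                 new_num = current_num * 10 + digit
--                 next_numbers.append(new_num)
--         current_numbers = next_numbers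
--     # 使用set去重
--     return list(set(current_numbers))
-- ===== SOURCE B (Python) =====
-- def generate_n_digit_nums_loop(intervals: list[list[int]]) -> list[int]:
--     if not intervals:
--         return []
--     # build suffix values back-to-front, tracking the place value of the next position
--     suffixes = [0]
--     weight = 1
--     for interval in reversed(intervals[1:]):
--         suffixes = [d * weight + s for d in interval for s in suffixes]
--         weight *= 10
--     nums = [d * weight + s for d in intervals[0] if d != 0 for s in suffixes]
--     return list(set(nums))
-- ===== Notes on version B (the rewrite author's own statement) =====
-- stated objective: alternative
-- what changed: B builds the numbers back-to-front: it folds the non-first intervals in reverse into a list of suffix values with an explicit place weight (d*weight+s), then combines the zero-filtered first digits once, instead of A's forward BFS that re-appends via acc*10+digit position by position.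
import Mathlib
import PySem

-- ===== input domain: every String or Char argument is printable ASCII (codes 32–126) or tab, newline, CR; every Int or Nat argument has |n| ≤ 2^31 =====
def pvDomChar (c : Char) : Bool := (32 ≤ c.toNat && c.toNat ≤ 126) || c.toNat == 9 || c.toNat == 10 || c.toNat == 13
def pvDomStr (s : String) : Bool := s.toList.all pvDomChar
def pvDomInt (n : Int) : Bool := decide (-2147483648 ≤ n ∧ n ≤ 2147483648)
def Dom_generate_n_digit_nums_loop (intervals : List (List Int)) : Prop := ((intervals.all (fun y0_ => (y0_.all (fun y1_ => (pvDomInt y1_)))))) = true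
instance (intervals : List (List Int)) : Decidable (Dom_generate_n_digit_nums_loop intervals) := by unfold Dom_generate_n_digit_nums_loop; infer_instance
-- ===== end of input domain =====

-- B builds the numbers back-to-front from suffix values with explicit place weights,
-- instead of A's position-by-position forward accumulation; equal return value (a deduplicated list).


-- ===== PORT A =====
-- list(set(xs)) is ported as PySem.Set.ofList xs (the distinct elements; the result is compared as a set)
def generate_n_digit_nums_loop (intervals : List (List Int)) : List Int :=
  if intervals = [] then []
  else
    let current_numbers :=
      (PySem.List.enumerate intervals).foldl
        (fun current_numbers pi =>
          current_numbers.foldl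
            (fun next_numbers current_num =>
              pi.2.foldl
                (fun next_numbers digit =>
                  if pi.1 = 0 ∧ digit = 0 then next_numbers
                  else next_numbers ++ [current_num * 10 + digit])
                next_numbers)
            [])
        [0]
    PySem.Set.ofList current_numbers

-- ===== PORT B =====
-- list(set(xs)) is ported as PySem.Set.ofList xs (the distinct elements; the result is compared as a set)
def generate_n_digit_nums_loop_alt (intervals : List (List Int)) : List Int :=
  match intervals with
  | [] => []
  | first :: rest =>
    let st :=
      rest.reverse.foldl
        (fun (st : List Int × Int) interval =>
          (interval.flatMap (fun d => st.1.map (fun s => d * st.2 + s)), st.2 * 10))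
        ([0], 1)
    let nums := first.flatMap (fun d => if d ≠ 0 then st.1.map (fun s => d * st.2 + s) else [])
    PySem.Set.ofList nums

-- ===== PRECONDITION & SPEC =====
def Spec_generate_n_digit_nums_loop (intervals : List (List Int)) (out : List Int) : Prop := out = generate_n_digit_nums_loop_alt intervals
instance (intervals : List (List Int)) (out : List Int) : Decidable (Spec_generate_n_digit_nums_loop intervals out) := by unfold Spec_generate_n_digit_nums_loop; infer_instance

-- ===== CLAIM (what is proved, stated in full; the proofs are below) =====
def Claim_equal_generate_n_digit_nums_loop : Prop := ∀ (intervals : List (List Int)), Dom_generate_n_digit_nums_loop intervals → Spec_generate_n_digit_nums_loop intervals (generate_n_digit_nums_loop intervals)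

-- ===== LEMMAS AND PROOFS =====

-- B's suffix state, as a function of the remaining (non-first) intervals
def pvBst (rest : List (List Int)) : List Int × Int :=
  rest.reverse.foldl
    (fun (st : List Int × Int) interval =>
      (interval.flatMap (fun d => st.1.map (fun s => d * st.2 + s)), st.2 * 10))
    ([0], 1)

lemma pvBst_cons (I : List Int) (rest : List (List Int)) :
    pvBst (I :: rest) =
      (I.flatMap (fun d => (pvBst rest).1.map (fun s => d * (pvBst rest).2 + s)), (pvBst rest).2 * 10) := by
  simp [pvBst, List.foldl_append]

-- A's inner double loop at a position p ≠ 0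
lemma pv_stepA (p : Int) (hp : p ≠ 0) (I cur acc : List Int) :
    cur.foldl
      (fun next c =>
        I.foldl (fun next d => if p = 0 ∧ d = 0 then next else next ++ [c * 10 + d]) next)
      acc
    = acc ++ cur.flatMap (fun c => I.map (fun d => c * 10 + d)) := by
  induction cur generalizing acc with
  | nil => simp
  | cons c cur ih =>
    have h : (fun (next : List Int) d => if p = 0 ∧ d = 0 then next else next ++ [c * 10 + d])
        = fun next d => next ++ [c * 10 + d] := by
      funext next d; simp [hp]
    rw [List.foldl_cons, ih, h, PySem.List.foldl_append_singleton_eq_map,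
      List.flatMap_cons, List.append_assoc]

-- A's inner double loop at position 0, on the single start value 0
lemma pv_firstA (first acc : List Int) :
    first.foldl
      (fun next d => if d = 0 then next else next ++ [(0 : Int) * 10 + d])
      acc
    = acc ++ first.flatMap (fun d => if d = 0 then [] else [d]) := by
  induction first generalizing acc with
  | nil => simp
  | cons d first ih =>
    rw [List.foldl_cons]
    by_cases hd : d = 0
    · rw [if_pos hd, ih]; simp [hd]
    · rw [if_neg hd, ih]; simp [hd]

-- A's fold over the remaining positions computes B's suffix combination
lemma pv_tailA (rest : List (List Int)) (s : Int) (hs : 1 ≤ s) (cur : List Int) :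
    (PySem.List.enumerate rest s).foldl
      (fun current_numbers pi =>
        current_numbers.foldl
          (fun next_numbers current_num =>
            pi.2.foldl
              (fun next_numbers digit =>
                if pi.1 = 0 ∧ digit = 0 then next_numbers
                else next_numbers ++ [current_num * 10 + digit])
              next_numbers)
          [])
      cur
    = cur.flatMap (fun c => (pvBst rest).1.map (fun s' => c * (pvBst rest).2 + s')) := by
  induction rest generalizing s cur with
  | nil =>
    simp [pvBst, PySem.List.enumerate_nil]
  | cons I rest ih =>
    rw [PySem.List.enumerate_cons, List.foldl_cons, ih (s + 1) (by omega)]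
    show ((cur.foldl (fun next c =>
        I.foldl (fun next d => if s = 0 ∧ d = 0 then next else next ++ [c * 10 + d]) next) []).flatMap _) = _
    rw [pv_stepA s (by omega) I cur [], List.nil_append, pvBst_cons]
    simp only [List.flatMap_assoc, List.map_flatMap, List.flatMap_map]
    refine List.flatMap_congr (fun c _ => ?_)
    refine List.flatMap_congr (fun d _ => ?_)
    rw [List.map_map]
    refine List.map_congr_left (fun x _ => ?_)
    simp only [Function.comp]
    ring


-- ===== VERDICT (by name: the statement is the Claim_ definition above) =====
lemma pv_bridge (first : List Int) (g : Int → List Int) :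
    (first.flatMap (fun d => if d = 0 then [] else [d])).flatMap g
    = first.flatMap (fun d => if d ≠ 0 then g d else []) := by
  induction first with
  | nil => rfl
  | cons d first ih =>
    by_cases hd : d = 0 <;> simp [hd, ih]

theorem generate_n_digit_nums_loop_spec : Claim_equal_generate_n_digit_nums_loop := by
  intro intervals _
  show generate_n_digit_nums_loop intervals = generate_n_digit_nums_loop_alt intervals
  cases intervals with
  | nil => rfl
  | cons first rest =>
    simp only [generate_n_digit_nums_loop, generate_n_digit_nums_loop_alt]
    rw [if_neg (List.cons_ne_nil first rest)]
    rw [show (List.foldl (fun (st : List Int × Int) interval => (List.flatMap (fun d => List.map (fun s => d * st.2 + s) st.1) interval, st.2 * 10)) ([0], 1) rest.reverse) = pvBst rest from rfl]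
    apply congrArg
    rw [PySem.List.enumerate_cons, List.foldl_cons, pv_tailA rest (0 + 1) (by norm_num)]
    show (([0] : List Int).foldl (fun next_numbers current_num =>
        first.foldl (fun next_numbers digit =>
          if (0 : Int) = 0 ∧ digit = 0 then next_numbers
          else next_numbers ++ [current_num * 10 + digit]) next_numbers) []).flatMap _ = _
    simp only [List.foldl_cons, List.foldl_nil, true_and]
    rw [pv_firstA first [], List.nil_append, pv_bridge]
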